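-- pv_equiv track=rewrite | github.com/LingHsiLiu/LeetCode | AMA-Campus/18/substring with k distinct.py | StringLengthK
-- ===== SOURCE A (Python) =====
-- def StringLengthK(string, k):
--     if k == 0 or not string:
--         return []
--     hash = {}
--     result = []
--     start = 0
--
--     for i in range(len(string)):
--         if string[i] in hash:
--             idx = hash[string[i]]
--             for j in range(start, idx):
--                 hash.pop(string[j])
--             start = idx + 1
--         else:
--             if i - start + 1 > k:
--                 hash.pop(string[start])
--                 start += 1
--         hash[string[i]] = i
--         if i - start + 1 == k:
--             result.append(string[start:i+1])
--     return result
-- ===== SOURCE B (Python) =====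
-- def StringLengthK(string, k):
--     if k == 0 or not string:
--         return []
--     result = []
--     for i in range(len(string) - k + 1):
--         sub = string[i:i+k]
--         if len(set(sub)) == k:
--             result.append(sub)
--     return result
-- ===== Notes on version B (the rewrite author's own statement) =====
-- stated objective: simpler
-- what changed: B replaces A's amortized sliding window (last-seen-index dict, window shrinking and explicit start pointer) by a direct scan that checks each length-k window for distinctness with len(set(sub)) == k.
import Mathlib
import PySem

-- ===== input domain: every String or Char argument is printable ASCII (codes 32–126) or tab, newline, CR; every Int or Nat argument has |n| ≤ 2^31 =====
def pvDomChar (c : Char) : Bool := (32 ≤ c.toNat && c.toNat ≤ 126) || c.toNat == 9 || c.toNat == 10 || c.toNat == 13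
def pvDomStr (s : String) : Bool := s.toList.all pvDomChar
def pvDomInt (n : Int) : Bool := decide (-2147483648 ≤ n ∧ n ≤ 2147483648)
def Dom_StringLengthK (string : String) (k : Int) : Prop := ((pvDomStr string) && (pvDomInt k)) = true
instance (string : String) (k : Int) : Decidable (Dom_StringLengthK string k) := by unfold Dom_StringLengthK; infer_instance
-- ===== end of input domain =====

-- B replaces A's amortized sliding window (last-seen-index dict, per-step window shrinking)
-- by a direct per-window distinctness check; objective: simpler. Equal return value on Pre_.

-- ===== PORT A =====
-- the loop body of A (hash, result, start updated per index i); hash.pop → Dict.erase is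
-- exact here: inside Pre_ every popped key is present (window chars), so no KeyError occurs
def pvStepA (string : String) (k : Int)
    (st : PySem.Dict Char Int × List String × Int) (i : Int) :
    PySem.Dict Char Int × List String × Int :=
  let hash := st.1
  let result := st.2.1
  let start := st.2.2
  let c := PySem.List.pyGetD string.toList i ' '   -- string[i]; exact: i ∈ range(len(string))
  let hs : PySem.Dict Char Int × Int :=
    match PySem.Dict.get? hash c with
    | some idx =>
        ((PySem.List.pyRange start idx 1).foldl
            (fun h j => PySem.Dict.erase h (PySem.List.pyGetD string.toList j ' ')) hash,
         idx + 1)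
    | none =>
        if i - start + 1 > k then
          (PySem.Dict.erase hash (PySem.List.pyGetD string.toList start ' '), start + 1)
        else (hash, start)
  let hash := (hs.1).insert c i
  let start := hs.2
  let result :=
    if i - start + 1 = k then result ++ [PySem.Str.slice string (some start) (some (i + 1))]
    else result
  (hash, result, start)

def StringLengthK (string : String) (k : Int) : List String :=
  if k = 0 ∨ string.toList = [] then []
  else
    ((PySem.List.pyRange 0 (string.toList.length : Int) 1).foldl
        (pvStepA string k) (PySem.Dict.empty, [], 0)).2.1

-- ===== PORT B =====
-- the loop body of B: append string[i:i+k] when len(set(sub)) == k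
def pvStepB (string : String) (k : Int) (result : List String) (i : Int) : List String :=
  let sub := PySem.Str.slice string (some i) (some (i + k))
  if PySem.Set.len (PySem.Set.ofList sub.toList) = k then result ++ [sub] else result

def StringLengthK_alt (string : String) (k : Int) : List String :=
  if k = 0 ∨ string.toList = [] then []
  else
    (PySem.List.pyRange 0 (PySem.Str.len string - k + 1) 1).foldl (pvStepB string k) []

-- ===== PRECONDITION & SPEC =====
-- Pre_ excludes only the inputs where A raises: for k < 0 on a nonempty string A's first
-- iteration executes hash.pop(string[0]) on an empty dict → KeyError.
def Pre_StringLengthK (string : String) (k : Int) : Prop := 0 ≤ k ∨ string = ""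
instance (string : String) (k : Int) : Decidable (Pre_StringLengthK string k) := by
  unfold Pre_StringLengthK; infer_instance
def pvWitness_StringLengthK : String × Int := ("abcab", 3)

def Spec_StringLengthK (string : String) (k : Int) (out : List String) : Prop :=
  out = StringLengthK_alt string k
instance (string : String) (k : Int) (out : List String) : Decidable (Spec_StringLengthK string k out) := by
  unfold Spec_StringLengthK; infer_instance

-- ===== CLAIM (what is proved, stated in full; the proofs are below) =====
def Claim_equal_StringLengthK : Prop := ∀ (string : String) (k : Int),
  Dom_StringLengthK string k → Pre_StringLengthK string k →
  Spec_StringLengthK string k (StringLengthK string k)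

-- ===== LEMMAS AND PROOFS =====

-- abbreviation used throughout: the character of `string` at integer index j
def pvChr (string : String) (j : Int) : Char := PySem.List.pyGetD string.toList j ' '

-- A's loop invariant after processing indices 0 .. i-1:
--   hash maps exactly the characters of the current window [start, i) to their index,
--   the window is duplicate-free, has length ≤ k, start is minimal for that (M), and
--   result already equals B's fold over all full windows ending before i.
def InvA (string : String) (k : Int) (i : Int)
    (st : PySem.Dict Char Int × List String × Int) : Prop :=
  0 ≤ st.2.2 ∧ st.2.2 ≤ i ∧
  (∀ c j, (st.1).get? c = some j ↔ (st.2.2 ≤ j ∧ j < i ∧ pvChr string j = c)) ∧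
  (∀ a b : Int, st.2.2 ≤ a → a < b → b < i → pvChr string a ≠ pvChr string b) ∧
  i - st.2.2 ≤ k ∧
  (st.2.2 = 0 ∨ i - st.2.2 = k ∨
    ∃ j, st.2.2 ≤ j ∧ j < i ∧ pvChr string j = pvChr string (st.2.2 - 1)) ∧
  st.2.1 = (PySem.List.pyRange 0 (i - k + 1) 1).foldl (pvStepB string k) []

theorem pv_get?_erase {κ ν : Type} [BEq κ] [LawfulBEq κ] [DecidableEq κ] (d : PySem.Dict κ ν) (x y : κ) :
    (d.erase x).get? y = if y = x then none else d.get? y := by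
  obtain ⟨items⟩ := d
  induction items with
  | nil => simp [PySem.Dict.get?, PySem.Dict.erase]
  | cons p rest ih =>
      simp only [PySem.Dict.get?, PySem.Dict.erase, List.filter_cons] at *
      by_cases h1 : p.1 = x <;> by_cases h2 : p.1 = y <;> simp_all [beq_iff_eq]

theorem pv_get?_foldl_erase {ν : Type} (f : Int → Char) (ks : List Int)
    (d : PySem.Dict Char ν) (c : Char) :
    (ks.foldl (fun h j => PySem.Dict.erase h (f j)) d).get? c =
      if ∃ j ∈ ks, f j = c then none else d.get? c := by
  induction ks generalizing d with
  | nil => simp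
  | cons j ks ih =>
      simp only [List.foldl_cons, ih, pv_get?_erase]
      rcases Decidable.em (∃ j' ∈ ks, f j' = c) with he | he
      · simp [he]
      · by_cases hc : c = f j
        · rw [if_neg he, if_pos hc, if_pos ⟨j, List.mem_cons_self, hc.symm⟩]
        · rw [if_neg he, if_neg hc, if_neg ?_]
          intro h
          rcases h with ⟨x, hx, hfx⟩
          rcases List.mem_cons.mp hx with rfl | hx
          · exact hc hfx.symm
          · exact he ⟨x, hx, hfx⟩

theorem pv_set_len_iff (l : List Char) :
    PySem.Set.len (PySem.Set.ofList l) = (l.length : Int) ↔ l.Nodup := by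
  constructor
  · intro h
    have hperm : (PySem.Set.ofList l).Perm l.dedup := by
      rw [List.perm_ext_iff_of_nodup (PySem.Set.nodup_ofList l) l.nodup_dedup]
      intro a; rw [PySem.Set.mem_ofList, List.mem_dedup]
    have hlen : l.dedup.length = l.length := by
      have := hperm.length_eq
      simp only [PySem.Set.len] at h
      omega
    rw [← List.dedup_eq_self]
    exact (List.dedup_sublist l).eq_of_length hlen
  · intro h
    rw [PySem.Set.ofList_eq_self_of_nodup l h]
    rfl

theorem pv_window_len (string : String) (s e : Int) (hs : 0 ≤ s) (hse : s ≤ e)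
    (he : e ≤ (string.toList.length : Int)) :
    ((PySem.Str.slice string (some s) (some e)).toList.length : Int) = e - s := by
  rw [PySem.Str.toList_slice]
  show ((PySem.List.slice string.toList (some s) (some e)).length : Int) = e - s
  rw [PySem.List.slice_toNat _ hs (by omega)]
  rw [List.length_take, List.length_drop]
  omega

theorem pv_chr_eq (string : String) (m : Nat) (hm : m < string.toList.length) :
    string.toList[m]? = some (pvChr string (m : Int)) := by
  rw [pvChr, PySem.List.pyGetD_eq_getElem _ _ (by omega) (by omega)]
  rw [List.getElem?_eq_getElem hm]
  simp

theorem pv_window_nodup_iff (string : String) (s e : Int) (hs : 0 ≤ s) (hse : s ≤ e)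
    (he : e ≤ (string.toList.length : Int)) :
    (PySem.Str.slice string (some s) (some e)).toList.Nodup ↔
      ∀ a b : Int, s ≤ a → a < b → b < e → pvChr string a ≠ pvChr string b := by
  rw [PySem.Str.toList_slice]
  show (PySem.List.slice string.toList (some s) (some e)).Nodup ↔ _
  rw [PySem.List.slice_toNat _ hs (by omega)]
  have hlen : (List.take (e.toNat - s.toNat) (List.drop s.toNat string.toList)).length
      = e.toNat - s.toNat := by
    rw [List.length_take, List.length_drop]; omega
  rw [List.nodup_iff_getElem?_ne_getElem?]
  constructor
  · intro h a b ha hab hb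
    have := h (a.toNat - s.toNat) (b.toNat - s.toNat) (by omega) (by omega)
    rw [List.getElem?_take, List.getElem?_take, List.getElem?_drop, List.getElem?_drop,
        if_pos (by omega), if_pos (by omega)] at this
    rw [(by omega : s.toNat + (a.toNat - s.toNat) = a.toNat),
        (by omega : s.toNat + (b.toNat - s.toNat) = b.toNat)] at this
    rw [pv_chr_eq _ _ (by omega), pv_chr_eq _ _ (by omega)] at this
    rw [(by omega : ((a.toNat : Int)) = a), (by omega : ((b.toNat : Int)) = b)] at this
    intro hebb; exact this (by rw [hebb])
  · intro h p q hpq hq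
    rw [hlen] at hq
    rw [List.getElem?_take, List.getElem?_take, List.getElem?_drop, List.getElem?_drop,
        if_pos (by omega), if_pos (by omega)]
    have := h (s + p) (s + q) (by omega) (by omega) (by omega)
    rw [(by omega : s.toNat + p = ((s + (p:Int)).toNat)),
        (by omega : s.toNat + q = ((s + (q:Int)).toNat))]
    rw [pv_chr_eq _ _ (by omega), pv_chr_eq _ _ (by omega)]
    rw [(by omega : (((s + (p:Int)).toNat : Int)) = s + p),
        (by omega : (((s + (q:Int)).toNat : Int)) = s + q)]
    intro hsome; exact this (Option.some.inj hsome)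

-- how B's fold grows when the window end advances from i to i+1, expressed with A's new start s'
theorem pv_result_step (string : String) (k : Int) (hk : 1 ≤ k) (i s' : Int)
    (hs0 : 0 ≤ s') (hs : s' ≤ i) (hn : i < (string.toList.length : Int))
    (hL : i + 1 - s' ≤ k)
    (hD : ∀ a b : Int, s' ≤ a → a < b → b < i + 1 → pvChr string a ≠ pvChr string b)
    (hM : s' = 0 ∨ i + 1 - s' = k ∨
      ∃ j, s' ≤ j ∧ j < i + 1 ∧ pvChr string j = pvChr string (s' - 1)) :
    (PySem.List.pyRange 0 (i + 1 - k + 1) 1).foldl (pvStepB string k) [] =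
      (if i - s' + 1 = k then
        (PySem.List.pyRange 0 (i - k + 1) 1).foldl (pvStepB string k) [] ++
          [PySem.Str.slice string (some s') (some (i + 1))]
       else (PySem.List.pyRange 0 (i - k + 1) 1).foldl (pvStepB string k) []) := by
  by_cases ha : i - k + 1 < 0
  · rw [PySem.List.pyRange_one_eq_nil (by omega), PySem.List.pyRange_one_eq_nil (by omega),
        if_neg (by omega)]
  · push_neg at ha
    rw [(by omega : i + 1 - k + 1 = (i - k + 1) + 1), PySem.List.pyRange_one_succ_right (by omega),
        List.foldl_append, List.foldl_cons, List.foldl_nil]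
    have hlen : ((PySem.Str.slice string (some (i - k + 1)) (some (i - k + 1 + k))).toList.length : Int) = k := by
      rw [pv_window_len string _ _ (by omega) (by omega) (by omega)]; omega
    have hiff : PySem.Set.len (PySem.Set.ofList
        (PySem.Str.slice string (some (i - k + 1)) (some (i - k + 1 + k))).toList) = k ↔
        (i - s' + 1 = k) := by
      have h1 := pv_set_len_iff
        (PySem.Str.slice string (some (i - k + 1)) (some (i - k + 1 + k))).toList
      rw [hlen] at h1
      rw [h1, pv_window_nodup_iff string _ _ (by omega) (by omega) (by omega)]
      constructor
      · intro hpw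
        by_contra hne
        rcases hM with h0 | hk2 | ⟨j, hj1, hj2, hj3⟩
        · omega
        · omega
        · exact hpw (s' - 1) j (by omega) (by omega) (by omega) hj3.symm
      · intro hc a b ha1 hab hb
        exact hD a b (by omega) hab (by omega)
    by_cases hc : i - s' + 1 = k
    · rw [if_pos hc]
      simp only [pvStepB]
      rw [if_pos (hiff.mpr hc), (by omega : i - k + 1 = s'), (by omega : s' + k = i + 1)]
    · rw [if_neg hc]
      simp only [pvStepB]
      rw [if_neg (fun h => hc (hiff.mp h))]

theorem pv_stepA_inv (string : String) (k : Int) (hk : 1 ≤ k) (i : Int) (hi0 : 0 ≤ i)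
    (hin : i < (string.toList.length : Int)) (st : PySem.Dict Char Int × List String × Int)
    (h : InvA string k i st) : InvA string k (i + 1) (pvStepA string k st i) := by
  obtain ⟨h0, h1, H, D, L, M, R⟩ := h
  have hchr : PySem.List.pyGetD string.toList i ' ' = pvChr string i := rfl
  have hchrs : PySem.List.pyGetD string.toList st.2.2 ' ' = pvChr string st.2.2 := rfl
  unfold pvStepA
  rcases hget : PySem.Dict.get? st.1 (PySem.List.pyGetD string.toList i ' ') with _ | idx
  · -- string[i] not in hash
    have hfresh : ∀ j, st.2.2 ≤ j → j < i → pvChr string j ≠ pvChr string i := by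
      intro j hj1 hj2 he
      have := (H _ j).mpr ⟨hj1, hj2, he⟩
      rw [hchr] at hget
      rw [hget] at this
      cases this
    by_cases hgt : i - st.2.2 + 1 > k
    · -- window already full: drop string[start]
      have hsk : i - st.2.2 = k := by omega
      simp only [hget, if_pos hgt]
      have hD' : ∀ a b : Int, st.2.2 + 1 ≤ a → a < b → b < i + 1 →
          pvChr string a ≠ pvChr string b := by
        intro a b ha hab hb
        by_cases hbi : b = i
        · subst hbi; exact hfresh a (by omega) (by omega)
        · exact D a b (by omega) hab (by omega)
      simp only [InvA]
      refine ⟨by omega, by omega, ?_, hD', by omega, Or.inr (Or.inl (by omega)), ?_⟩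
      · intro c j
        rw [PySem.Dict.get?_insert, pv_get?_erase, hchr, hchrs]
        by_cases hci : c = pvChr string i
        · rw [if_pos hci]
          constructor
          · rintro ⟨rfl⟩
            exact ⟨by omega, by omega, hci.symm⟩
          · rintro ⟨hj1, hj2, hj3⟩
            by_cases hji : j = i
            · subst hji; rfl
            · exact absurd (hj3.trans hci) (hfresh j (by omega) (by omega))
        · rw [if_neg hci]
          by_cases hcs : c = pvChr string st.2.2
          · rw [if_pos hcs]
            constructor
            · intro hx; cases hx
            · rintro ⟨hj1, hj2, hj3⟩
              by_cases hji : j = i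
              · subst hji; exact absurd hj3.symm hci
              · exact absurd (hj3.trans hcs).symm (D st.2.2 j le_rfl (by omega) (by omega))
          · rw [if_neg hcs, H c j]
            constructor
            · rintro ⟨hj1, hj2, hj3⟩
              refine ⟨?_, by omega, hj3⟩
              rcases eq_or_lt_of_le hj1 with rfl | hlt
              · exact absurd hj3.symm hcs
              · omega
            · rintro ⟨hj1, hj2, hj3⟩
              by_cases hji : j = i
              · subst hji; exact absurd hj3.symm hci
              · exact ⟨by omega, by omega, hj3⟩
      · rw [R, pv_result_step string k hk i (st.2.2 + 1) (by omega) (by omega) hin (by omega)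
            hD' (Or.inr (Or.inl (by omega)))]
    · -- window grows by one
      simp only [hget, if_neg hgt]
      have hD' : ∀ a b : Int, st.2.2 ≤ a → a < b → b < i + 1 →
          pvChr string a ≠ pvChr string b := by
        intro a b ha hab hb
        by_cases hbi : b = i
        · subst hbi; exact hfresh a (by omega) (by omega)
        · exact D a b (by omega) hab (by omega)
      have hM' : st.2.2 = 0 ∨ i + 1 - st.2.2 = k ∨
          ∃ j, st.2.2 ≤ j ∧ j < i + 1 ∧ pvChr string j = pvChr string (st.2.2 - 1) := by
        rcases M with hA | hB | ⟨j, hj1, hj2, hj3⟩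
        · exact Or.inl hA
        · omega
        · exact Or.inr (Or.inr ⟨j, hj1, by omega, hj3⟩)
      simp only [InvA]
      refine ⟨by omega, by omega, ?_, hD', by omega, hM', ?_⟩
      · intro c j
        rw [PySem.Dict.get?_insert, hchr]
        by_cases hci : c = pvChr string i
        · rw [if_pos hci]
          constructor
          · rintro ⟨rfl⟩
            exact ⟨by omega, by omega, hci.symm⟩
          · rintro ⟨hj1, hj2, hj3⟩
            by_cases hji : j = i
            · subst hji; rfl
            · exact absurd (hj3.trans hci) (hfresh j (by omega) (by omega))
        · rw [if_neg hci, H c j]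
          constructor
          · rintro ⟨hj1, hj2, hj3⟩
            exact ⟨hj1, by omega, hj3⟩
          · rintro ⟨hj1, hj2, hj3⟩
            by_cases hji : j = i
            · subst hji; exact absurd hj3.symm hci
            · exact ⟨hj1, by omega, hj3⟩
      · rw [R, pv_result_step string k hk i st.2.2 h0 h1 hin (by omega) hD' hM']
  · -- string[i] seen inside the window at index idx
    obtain ⟨hidx1, hidx2, hidx3⟩ := (H _ idx).mp hget
    rw [hchr] at hidx3
    simp only [hget]
    have hD' : ∀ a b : Int, idx + 1 ≤ a → a < b → b < i + 1 →
        pvChr string a ≠ pvChr string b := by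
      intro a b ha hab hb
      by_cases hbi : b = i
      · subst hbi
        intro he
        have := (H (PySem.List.pyGetD string.toList b ' ') a).mpr ⟨by omega, by omega, he⟩
        rw [hget] at this
        have : a = idx := by injection this with h'; omega
        omega
      · exact D a b (by omega) hab (by omega)
    have hM' : idx + 1 = 0 ∨ i + 1 - (idx + 1) = k ∨
        ∃ j, idx + 1 ≤ j ∧ j < i + 1 ∧ pvChr string j = pvChr string (idx + 1 - 1) := by
      refine Or.inr (Or.inr ⟨i, by omega, by omega, ?_⟩)
      rw [(by omega : idx + 1 - 1 = idx)]
      exact hidx3.symm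
    simp only [InvA]
    refine ⟨by omega, by omega, ?_, hD', by omega, hM', ?_⟩
    · intro c j
      rw [PySem.Dict.get?_insert,
          pv_get?_foldl_erase (fun j => PySem.List.pyGetD string.toList j ' '), hchr]
      by_cases hci : c = pvChr string i
      · rw [if_pos hci]
        constructor
        · rintro ⟨rfl⟩
          exact ⟨by omega, by omega, hci.symm⟩
        · rintro ⟨hj1, hj2, hj3⟩
          by_cases hji : j = i
          · subst hji; rfl
          · refine absurd ?_ (D idx j hidx1 (by omega) (by omega))
            calc pvChr string idx = pvChr string i := hidx3
              _ = c := hci.symm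
              _ = pvChr string j := hj3.symm
      · rw [if_neg hci]
        by_cases hcr : ∃ j' ∈ PySem.List.pyRange st.2.2 idx 1,
            PySem.List.pyGetD string.toList j' ' ' = c
        · rw [if_pos hcr]
          obtain ⟨j', hj'mem, hj'c⟩ := hcr
          rw [PySem.List.mem_pyRange_one] at hj'mem
          constructor
          · intro hx; cases hx
          · rintro ⟨hj1, hj2, hj3⟩
            by_cases hji : j = i
            · subst hji; exact absurd hj3.symm hci
            · exact absurd ((hj'c.trans hj3.symm) : pvChr string j' = pvChr string j)
                (D j' j (by omega) (by omega) (by omega))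
        · rw [if_neg hcr, H c j]
          constructor
          · rintro ⟨hj1, hj2, hj3⟩
            refine ⟨?_, by omega, hj3⟩
            by_contra hlt
            push_neg at hlt
            have hjne : j ≠ idx := fun he => hci (by rw [← hj3, he, hidx3])
            exact hcr ⟨j, PySem.List.mem_pyRange_one.mpr ⟨hj1, by omega⟩, hj3⟩
          · rintro ⟨hj1, hj2, hj3⟩
            by_cases hji : j = i
            · subst hji; exact absurd hj3.symm hci
            · exact ⟨by omega, by omega, hj3⟩
    · rw [R, pv_result_step string k hk i (idx + 1) (by omega) (by omega) hin (by omega)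
          hD' hM']

theorem pv_loop_inv (string : String) (k : Int) (hk : 1 ≤ k) (m : Nat)
    (hm : m ≤ string.toList.length) :
    InvA string k (m : Int)
      ((PySem.List.pyRange 0 (m : Int) 1).foldl (pvStepA string k) (PySem.Dict.empty, [], 0)) := by
  induction m with
  | zero =>
      simp only [Nat.cast_zero]
      rw [PySem.List.pyRange_one_eq_nil le_rfl]
      simp only [InvA, List.foldl_nil]
      refine ⟨le_rfl, le_rfl, ?_, ?_, by omega, Or.inl (by trivial), ?_⟩
      · intro c j
        rw [PySem.Dict.get?_empty]
        constructor
        · intro hx; cases hx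
        · rintro ⟨hj1, hj2, -⟩; omega
      · intro a b ha hab hb; omega
      · rw [PySem.List.pyRange_one_eq_nil (by omega)]
        simp
  | succ m ih =>
      have hcast : ((m + 1 : Nat) : Int) = (m : Int) + 1 := by push_cast; ring
      rw [hcast, PySem.List.pyRange_one_succ_right (by positivity), List.foldl_append,
          List.foldl_cons, List.foldl_nil]
      exact pv_stepA_inv string k hk (m : Int) (by positivity) (by omega)
        _ (ih (by omega))

-- ===== VERDICT (by name: the statement is the Claim_ definition above) =====
theorem StringLengthK_spec : Claim_equal_StringLengthK := by
  intro string k _hdom hpre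
  unfold Spec_StringLengthK StringLengthK StringLengthK_alt
  by_cases hg : k = 0 ∨ string.toList = []
  · rw [if_pos hg, if_pos hg]
  · rw [if_neg hg, if_neg hg]
    push_neg at hg
    obtain ⟨hk0, hne⟩ := hg
    unfold Pre_StringLengthK at hpre
    have hk : 1 ≤ k := by
      rcases hpre with h | h
      · omega
      · exact absurd (by rw [h]; decide : string.toList = []) hne
    obtain ⟨-, -, -, -, -, -, R⟩ :=
      pv_loop_inv string k hk string.toList.length le_rfl
    rw [R, PySem.Str.len_eq]
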